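-- pv_equiv track=rewrite | github.com/Butskov/Bioinformatics-Algorithms | 15 - Gapped Genome Path String Problem.py | get_balance_count
-- ===== SOURCE A (Python) =====
-- def get_balance_count(adj_list):
--     balanced_count = dict.fromkeys(adj_list.keys(), 0)
--     for node in adj_list.keys():
--         for out in adj_list[node]:
--             balanced_count[node] -= 1
--             try:
--                 balanced_count[out] += 1
--             except:
--                 balanced_count[out] = 1
--     return balanced_count
-- ===== SOURCE B (Python) =====
-- def get_balance_count(adj_list):
--     out_deg = {node: len(targets) for node, targets in adj_list.items()}
--     in_deg = {}
--     for targets in adj_list.values():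
--         for t in targets:
--             in_deg[t] = in_deg.get(t, 0) + 1
--     balance = {node: in_deg.get(node, 0) - out_deg[node] for node in adj_list}
--     for t, c in in_deg.items():
--         if t not in balance:
--             balance[t] = c
--     return balance
-- ===== Notes on version B (the rewrite author's own statement) =====
-- stated objective: alternative
-- what changed: A makes one interleaved pass over every edge, decrementing the source and incrementing the target (with try/except creating missing keys) in a single dict; B instead computes an out-degree table and an in-degree counter as two separate aggregations and then merges them over the union of keys.
import Mathlib
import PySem

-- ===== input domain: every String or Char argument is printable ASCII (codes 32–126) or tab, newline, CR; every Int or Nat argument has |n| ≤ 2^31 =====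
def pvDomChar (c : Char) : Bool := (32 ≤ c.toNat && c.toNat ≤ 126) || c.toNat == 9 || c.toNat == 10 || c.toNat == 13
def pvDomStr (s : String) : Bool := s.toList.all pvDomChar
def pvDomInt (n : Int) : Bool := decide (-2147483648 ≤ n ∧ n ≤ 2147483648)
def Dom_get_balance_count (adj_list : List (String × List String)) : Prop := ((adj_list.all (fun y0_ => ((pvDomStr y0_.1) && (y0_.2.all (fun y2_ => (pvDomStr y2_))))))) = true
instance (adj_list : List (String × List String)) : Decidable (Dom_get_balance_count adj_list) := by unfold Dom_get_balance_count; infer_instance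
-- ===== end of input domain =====

-- B replaces A's single interleaved -1/+1 pass over every edge (with its try/except key creation)
-- by three separate aggregations — an out-degree table, an in-degree counter, and a merge over the
-- key union; objective: alternative decomposition, same asymptotic cost.

-- ===== PORT A =====
-- Loop body of A: 'balanced_count[node] -= 1; try: balanced_count[out] += 1; except: balanced_count[out] = 1'
def pvStepA (d : PySem.Dict String Int) (e : String × String) : PySem.Dict String Int :=
  let d1 := d.modify e.1 0 (fun v => v - 1)
  if d1.contains e.2 then d1.modify e.2 0 (fun v => v + 1) else d1.insert e.2 1

def get_balance_count (adj_list : List (String × List String)) : List (String × Int) :=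
  let adjd : PySem.Dict String (List String) := PySem.Dict.ofList adj_list
  -- balanced_count = dict.fromkeys(adj_list.keys(), 0)
  let balanced0 : PySem.Dict String Int :=
    adjd.keys.foldl (fun d k => d.insert k 0) PySem.Dict.empty
  -- for node in adj_list.keys(): for out in adj_list[node]: <pvStepA>
  -- (adj_list[node] is a lookup that always hits a key; ported as getD with default [])
  let final := adjd.keys.foldl
    (fun d node => (adjd.getD node []).foldl (fun d out => pvStepA d (node, out)) d) balanced0
  final.items

-- ===== PORT B =====
def get_balance_count_alt (adj_list : List (String × List String)) : List (String × Int) :=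
  let adjd : PySem.Dict String (List String) := PySem.Dict.ofList adj_list
  -- out_deg = {node: len(targets) for node, targets in adj_list.items()}
  let out_deg : PySem.Dict String Int :=
    adjd.items.foldl (fun d p => d.insert p.1 (p.2.length : Int)) PySem.Dict.empty
  -- in_deg = {}; for targets in adj_list.values(): for t in targets: in_deg[t] = in_deg.get(t, 0) + 1
  let in_deg : PySem.Dict String Int :=
    adjd.values.foldl (fun d ts => ts.foldl (fun d t => d.insert t (d.getD t 0 + 1)) d)
      PySem.Dict.empty
  -- balance = {node: in_deg.get(node, 0) - out_deg[node] for node in adj_list}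
  -- (out_deg[node] is a lookup that always hits a key; ported as getD with default 0)
  let balance : PySem.Dict String Int :=
    adjd.keys.foldl (fun r node => r.insert node (in_deg.getD node 0 - out_deg.getD node 0))
      PySem.Dict.empty
  -- for t, c in in_deg.items(): if t not in balance: balance[t] = c
  let final := in_deg.items.foldl
    (fun r q => if r.contains q.1 then r else r.insert q.1 q.2) balance
  final.items

-- ===== PRECONDITION & SPEC =====
def Spec_get_balance_count (adj_list : List (String × List String)) (out : List (String × Int)) : Prop := out = get_balance_count_alt adj_list
instance (adj_list : List (String × List String)) (out : List (String × Int)) : Decidable (Spec_get_balance_count adj_list out) := by unfold Spec_get_balance_count; infer_instance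

-- ===== CLAIM (what is proved, stated in full; the proofs are below) =====
def Claim_equal_get_balance_count : Prop := ∀ (adj_list : List (String × List String)), Dom_get_balance_count adj_list → Spec_get_balance_count adj_list (get_balance_count adj_list)

-- ===== LEMMAS AND PROOFS =====

-- the common normal form both ports reduce to, over an arbitrary dict
def pvNormal (adjd : PySem.Dict String (List String)) : List (String × Int) :=
  (adjd.items.map (fun p => (p.1,
      ((adjd.items.flatMap Prod.snd).count p.1 : Int) - (p.2.length : Int))))
    ++ (((PySem.Set.ofList (adjd.items.flatMap Prod.snd)).filter
          (fun y => !(adjd.keys.contains y))).map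
        (fun k => (k, ((adjd.items.flatMap Prod.snd).count k : Int))))

-- dict.fromkeys(keys, 0): every lookup with default 0 yields 0
theorem pv_getD_fromkeys (ks : List String) (d : PySem.Dict String Int)
    (h : ∀ k, d.getD k 0 = 0) (k : String) :
    (ks.foldl (fun d k => d.insert k 0) d).getD k 0 = 0 := by
  induction ks generalizing d with
  | nil => exact h k
  | cons a t ih =>
      refine ih _ (fun k' => ?_)
      rw [PySem.Dict.getD_insert]
      split_ifs <;> simp [h]

-- value evolution of A's loop body
theorem pv_getD_stepA (d : PySem.Dict String Int) (e : String × String) (k : String) :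
    (pvStepA d e).getD k 0
      = d.getD k 0 - (if e.1 = k then 1 else 0) + (if e.2 = k then 1 else 0) := by
  obtain ⟨a, b⟩ := e
  unfold pvStepA
  by_cases hc : ((d.modify a 0 (fun v => v - 1)).contains b) = true
  · simp only [hc, if_true]
    rw [PySem.Dict.getD_modify, PySem.Dict.getD_modify, PySem.Dict.getD_modify]
    rcases eq_or_ne k a with rfl | h1
    · rcases eq_or_ne b k with rfl | h2
      · simp
      · simp [h2, Ne.symm h2]
    · rcases eq_or_ne b k with rfl | h2
      · simp [h1, Ne.symm h1]
      · simp [h1, h2, Ne.symm h1, Ne.symm h2]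
  · simp only [Bool.not_eq_true] at hc
    simp only [hc, Bool.false_eq_true, if_false]
    have h0 : (d.modify a 0 (fun v => v - 1)).getD b 0 = 0 :=
      PySem.Dict.getD_of_not_contains _ _ hc
    rw [PySem.Dict.getD_modify] at h0
    rw [PySem.Dict.getD_insert, PySem.Dict.getD_modify]
    rcases eq_or_ne k b with rfl | h2
    · rcases eq_or_ne k a with rfl | h1
      · rw [if_pos rfl] at h0; simp; omega
      · rw [if_neg h1] at h0; simp [Ne.symm h1]; omega
    · rcases eq_or_ne k a with rfl | h1
      · simp [h2, Ne.symm h2]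
      · simp [h1, h2, Ne.symm h1, Ne.symm h2]

-- key evolution of A's loop body, provided the source node is already a key
theorem pv_keys_stepA (d : PySem.Dict String Int) (e : String × String)
    (h : e.1 ∈ d.keys) :
    (pvStepA d e).keys = PySem.Set.add d.keys e.2 := by
  unfold pvStepA
  have h1 : (d.modify e.1 0 (fun v => v - 1)).keys = d.keys := by
    rw [PySem.Dict.keys_modify, PySem.Dict.keys_insert_of_contains]
    rw [PySem.Dict.contains_eq_decide_mem_keys]; simpa
  by_cases hc : ((d.modify e.1 0 (fun v => v - 1)).contains e.2) = true
  · simp only [hc, if_true]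
    rw [PySem.Dict.keys_modify, PySem.Dict.keys_insert_of_contains _ _ hc, h1]
    rw [PySem.Set.add_of_mem]
    rw [PySem.Dict.contains_eq_decide_mem_keys, h1] at hc
    simpa using hc
  · simp only [Bool.not_eq_true] at hc
    simp only [hc, Bool.false_eq_true, if_false]
    rw [PySem.Dict.keys_insert_of_not_contains _ _ hc, h1]
    rw [PySem.Set.add_of_not_mem]
    rw [PySem.Dict.contains_eq_decide_mem_keys, h1] at hc
    simpa using hc

-- A's edge loop: final value of any key
theorem pv_getD_foldA (es : List (String × String)) (d : PySem.Dict String Int) (k : String) :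
    (es.foldl pvStepA d).getD k 0
      = d.getD k 0 + ((es.map Prod.snd).count k : Int) - ((es.map Prod.fst).count k : Int) := by
  induction es generalizing d with
  | nil => simp
  | cons e t ih =>
      simp only [List.foldl_cons, List.map_cons, List.count_cons, beq_iff_eq, ih, pv_getD_stepA]
      by_cases h1 : e.1 = k <;> by_cases h2 : e.2 = k <;>
        simp only [h1, h2, if_true, if_false] <;> push_cast <;> omega

-- A's edge loop: final key list
theorem pv_keys_foldA (es : List (String × String)) (d : PySem.Dict String Int)
    (h : ∀ e ∈ es, e.1 ∈ d.keys) :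
    (es.foldl pvStepA d).keys = PySem.Set.update d.keys (es.map Prod.snd) := by
  induction es generalizing d with
  | nil => simp [PySem.Set.update_nil]
  | cons e t ih =>
      simp only [List.foldl_cons, List.map_cons, PySem.Set.update_cons]
      rw [← pv_keys_stepA d e (h e (by simp))]
      refine ih _ (fun e' he' => ?_)
      rw [pv_keys_stepA d e (h e (by simp)), PySem.Set.mem_add]
      exact Or.inl (h e' (by simp [he']))

-- number of edges out of k, counted over the flattened edge-source list
theorem pv_countFst_not_mem (ps : List (String × List String)) (k : String)
    (h : k ∉ ps.map Prod.fst) :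
    (ps.flatMap (fun p => List.replicate p.2.length p.1)).count k = 0 := by
  induction ps with
  | nil => simp
  | cons p t ih =>
      simp only [List.map_cons, List.mem_cons, not_or] at h
      simp only [List.flatMap_cons, List.count_append, ih h.2, Nat.add_zero]
      simp [List.count_replicate, Ne.symm h.1]

theorem pv_countFst_mem (ps : List (String × List String)) (p : String × List String)
    (hnd : (ps.map Prod.fst).Nodup) (hp : p ∈ ps) :
    (ps.flatMap (fun q => List.replicate q.2.length q.1)).count p.1 = p.2.length := by
  induction ps with
  | nil => simp at hp
  | cons q t ih =>
      simp only [List.map_cons, List.nodup_cons] at hnd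
      simp only [List.flatMap_cons, List.count_append]
      rcases List.mem_cons.mp hp with h | h
      · subst h
        rw [pv_countFst_not_mem t p.1 hnd.1]
        simp
      · have h1 : q.1 ≠ p.1 := by
          intro he; exact hnd.1 (he ▸ List.mem_map_of_mem h)
        rw [ih hnd.2 h]
        simp [List.count_replicate, h1]

-- B's final merge loop: conditional insertion of fresh keys appends exactly the new pairs
theorem pv_condInsert_fold (qs : List (String × Int)) (r : PySem.Dict String Int)
    (hnd : (qs.map Prod.fst).Nodup) :
    (qs.foldl (fun r q => if r.contains q.1 then r else r.insert q.1 q.2) r).items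
      = r.items ++ qs.filter (fun q => !(r.contains q.1)) := by
  induction qs generalizing r with
  | nil => simp
  | cons q t ih =>
      simp only [List.map_cons, List.nodup_cons] at hnd
      simp only [List.foldl_cons, List.filter_cons]
      by_cases hc : (r.contains q.1) = true
      · simp only [hc, if_true, Bool.not_true, Bool.false_eq_true, if_false]
        exact ih r hnd.2
      · simp only [Bool.not_eq_true] at hc
        simp only [hc, Bool.false_eq_true, if_false, Bool.not_false, if_true]
        rw [ih _ hnd.2, PySem.Dict.items_insert_of_not_contains _ _ hc,
            List.append_assoc, List.singleton_append]
        congr 1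
        congr 1
        apply List.filter_congr
        intro q' hq'
        rw [PySem.Dict.contains_insert]
        have hne : q'.1 ≠ q.1 := by
          intro he; exact hnd.1 (he ▸ List.mem_map_of_mem hq')
        simp [hne]

-- Port A over an arbitrary dict reduces to the normal form
theorem pv_A_items (adjd : PySem.Dict String (List String)) (hK : adjd.keys.Nodup) :
    (adjd.keys.foldl
        (fun d node => (adjd.getD node []).foldl (fun d out => pvStepA d (node, out)) d)
        (adjd.keys.foldl (fun d k => d.insert k (0 : Int)) PySem.Dict.empty)).items
      = pvNormal adjd := by
  have hkeys : adjd.keys = adjd.items.map Prod.fst := rfl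
  have hKnd : (adjd.items.map Prod.fst).Nodup := hkeys ▸ hK
  set b0 := adjd.keys.foldl (fun d k => d.insert k (0 : Int)) PySem.Dict.empty with hb0
  have hb0keys : b0.keys = adjd.keys := by
    rw [hb0, PySem.Dict.keys_foldl_insert adjd.keys (fun _ _ => (0 : Int)) PySem.Dict.empty,
        PySem.Dict.keys_empty, PySem.Set.update_nil_left,
        PySem.Set.ofList_eq_self_of_nodup _ hK]
  have hb0getD : ∀ k, b0.getD k 0 = 0 := by
    rw [hb0]; exact pv_getD_fromkeys adjd.keys PySem.Dict.empty (fun k => by simp)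
  set es := adjd.items.flatMap (fun p => p.2.map (fun t => (p.1, t))) with hes
  have hflat : adjd.keys.foldl
      (fun d node => (adjd.getD node []).foldl (fun d out => pvStepA d (node, out)) d) b0
      = es.foldl pvStepA b0 := by
    rw [hes, List.foldl_flatMap, hkeys, List.foldl_map]
    apply PySem.List.foldl_congr_mem
    intro acc p hp
    have hget : adjd.getD p.1 [] = p.2 :=
      PySem.Dict.getD_of_mem_items adjd (Prod.mk.eta ▸ hp) hK []
    rw [hget, List.foldl_map]
  rw [hflat]
  set fin := es.foldl pvStepA b0 with hfin
  have hsnd : es.map Prod.snd = adjd.items.flatMap Prod.snd := by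
    simp [hes, List.map_flatMap, List.map_map]
  have hfst : es.map Prod.fst = adjd.items.flatMap (fun p => List.replicate p.2.length p.1) := by
    simp [hes, List.map_flatMap, List.map_map]
  have hmem : ∀ e ∈ es, e.1 ∈ b0.keys := by
    intro e he
    rw [hb0keys, hkeys]
    simp only [hes, List.mem_flatMap, List.mem_map] at he
    obtain ⟨p, hp, t, _, rfl⟩ := he
    exact List.mem_map_of_mem hp
  have hfinkeys : fin.keys
      = PySem.Set.update adjd.keys (adjd.items.flatMap Prod.snd) := by
    rw [hfin, pv_keys_foldA es b0 hmem, hb0keys, hsnd]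
  have hfinnd : fin.keys.Nodup := by
    rw [hfinkeys]; exact PySem.Set.nodup_update _ _ hK
  have hval : ∀ k, fin.getD k 0
      = ((adjd.items.flatMap Prod.snd).count k : Int)
        - (((adjd.items.flatMap (fun p => List.replicate p.2.length p.1)).count k : Int)) := by
    intro k
    rw [hfin, pv_getD_foldA, hb0getD, hsnd, hfst]
    ring
  rw [PySem.Dict.items_eq_map_keys fin hfinnd 0, hfinkeys,
      PySem.Set.update_eq_append_filter, List.map_append]
  unfold pvNormal
  congr 1
  · rw [hkeys, List.map_map]
    apply List.map_congr_left
    intro p hp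
    show (p.1, fin.getD p.1 0) = _
    rw [hval p.1, pv_countFst_mem adjd.items p hKnd hp]
  · simp only [PySem.Set.contains_eq_listContains]
    apply List.map_congr_left
    intro y hy
    rw [List.mem_filter] at hy
    have hnotmem : y ∉ adjd.items.map Prod.fst := by
      have h2 := hy.2
      simp only [Bool.not_eq_true', List.contains_eq_mem, decide_eq_false_iff_not] at h2
      rw [hkeys] at h2
      exact h2
    rw [hval y, pv_countFst_not_mem adjd.items y hnotmem]
    simp

-- Port B over an arbitrary dict reduces to the same normal form
theorem pv_B_items (adjd : PySem.Dict String (List String)) (hK : adjd.keys.Nodup) :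
    ((PySem.Dict.counter (adjd.items.flatMap Prod.snd)).items.foldl
        (fun r q => if r.contains q.1 then r else r.insert q.1 q.2)
        (adjd.keys.foldl
          (fun r node => r.insert node
            ((PySem.Dict.counter (adjd.items.flatMap Prod.snd)).getD node 0
             - (adjd.items.foldl (fun d p => d.insert p.1 (p.2.length : Int))
                PySem.Dict.empty).getD node 0))
          PySem.Dict.empty)).items
      = pvNormal adjd := by
  have hkeys : adjd.keys = adjd.items.map Prod.fst := rfl
  have hKnd : (adjd.items.map Prod.fst).Nodup := hkeys ▸ hK
  set T := adjd.items.flatMap Prod.snd with hT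
  set out_deg := adjd.items.foldl (fun d p => d.insert p.1 (p.2.length : Int))
      PySem.Dict.empty with hout_deg
  have hout : out_deg.items = adjd.items.map (fun p => (p.1, (p.2.length : Int))) := by
    rw [hout_deg]
    have h := PySem.Dict.items_foldl_insert_fresh adjd.items Prod.fst
        (fun p => (p.2.length : Int)) PySem.Dict.empty
        (fun a _ => PySem.Dict.contains_empty _) hKnd
    simpa [pysem] using h
  have houtkeys : out_deg.keys = adjd.items.map Prod.fst := by
    show out_deg.items.map Prod.fst = _
    rw [hout, List.map_map]
    exact List.map_congr_left (fun a _ => rfl)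
  have houtnd : out_deg.keys.Nodup := by rw [houtkeys]; exact hKnd
  have houtgetD : ∀ p ∈ adjd.items, out_deg.getD p.1 0 = (p.2.length : Int) := by
    intro p hp
    exact PySem.Dict.getD_of_mem_items out_deg
      (by rw [hout]; exact List.mem_map_of_mem hp) houtnd 0
  set in_deg := PySem.Dict.counter T with hin_deg
  set balance := adjd.keys.foldl
      (fun r node => r.insert node (in_deg.getD node 0 - out_deg.getD node 0))
      PySem.Dict.empty with hbalance
  have hbal : balance.items
      = adjd.items.map (fun p => (p.1, ((T.count p.1 : Int) - (p.2.length : Int)))) := by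
    rw [hbalance, hkeys, List.foldl_map]
    have h := PySem.Dict.items_foldl_insert_fresh adjd.items Prod.fst
        (fun p => in_deg.getD p.1 0 - out_deg.getD p.1 0) PySem.Dict.empty
        (fun a _ => PySem.Dict.contains_empty _) hKnd
    have h2 : (adjd.items.foldl
        (fun r p => r.insert p.1 (in_deg.getD p.1 0 - out_deg.getD p.1 0))
        PySem.Dict.empty).items
        = adjd.items.map (fun p => (p.1, in_deg.getD p.1 0 - out_deg.getD p.1 0)) := by
      simpa [pysem] using h
    rw [h2]
    apply List.map_congr_left
    intro p hp
    rw [hin_deg, PySem.Dict.getD_counter, houtgetD p hp]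
  have hbalkeys : balance.keys = adjd.items.map Prod.fst := by
    show balance.items.map Prod.fst = _
    rw [hbal, List.map_map]
    exact List.map_congr_left (fun a _ => rfl)
  have hqnd : ((in_deg.items).map Prod.fst).Nodup := by
    rw [hin_deg, PySem.Dict.items_counter, List.map_map]
    have h3 : (PySem.Set.ofList T).map (Prod.fst ∘ fun k => (k, (List.count k T : Int)))
        = PySem.Set.ofList T := by
      have := List.map_id (PySem.Set.ofList T)
      exact (List.map_congr_left (fun a _ => rfl)).trans this
    rw [h3]
    exact PySem.Set.nodup_ofList T
  rw [pv_condInsert_fold in_deg.items balance hqnd, hbal]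
  unfold pvNormal
  rw [← hT]
  congr 1
  rw [hin_deg, PySem.Dict.items_counter, List.filter_map]
  congr 1
  apply List.filter_congr
  intro y _
  show (!(balance.contains y)) = _
  rw [PySem.Dict.contains_eq_decide_mem_keys, hbalkeys, ← hkeys]
  simp [List.contains_eq_mem]

theorem pv_in_deg_eq_counter (adjd : PySem.Dict String (List String)) :
    adjd.values.foldl (fun d ts => ts.foldl (fun d t => d.insert t (d.getD t 0 + 1)) d)
        PySem.Dict.empty
      = PySem.Dict.counter (adjd.items.flatMap Prod.snd) := by
  have hvals : adjd.values = adjd.items.map Prod.snd := rfl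
  rw [hvals, List.foldl_map, ← List.foldl_flatMap,
      PySem.Dict.foldl_insert_getD_add_one_eq_counter]

theorem pv_A_normal (adj_list : List (String × List String)) :
    get_balance_count adj_list = pvNormal (PySem.Dict.ofList adj_list) := by
  simp only [get_balance_count]
  exact pv_A_items _ (PySem.Dict.nodup_keys_ofList adj_list)

theorem pv_B_normal (adj_list : List (String × List String)) :
    get_balance_count_alt adj_list = pvNormal (PySem.Dict.ofList adj_list) := by
  simp only [get_balance_count_alt]
  rw [pv_in_deg_eq_counter]
  exact pv_B_items _ (PySem.Dict.nodup_keys_ofList adj_list)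

-- ===== VERDICT (by name: the statement is the Claim_ definition above) =====
theorem get_balance_count_spec : Claim_equal_get_balance_count := by
  intro adj_list _
  unfold Spec_get_balance_count
  rw [pv_A_normal adj_list, pv_B_normal adj_list]
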